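-- pv_equiv track=rewrite | github.com/alsgur9368/FM-Singer | utils/utils_kr.py | create_note_boundaries
-- ===== SOURCE A (Python) =====
-- def create_note_boundaries(note, note_dur):
--     note_boundaries = []
--     start = 0
--     end = 0
--     note_cnt = 0
--
--     for i in range(0, len(note_dur), 3):
--         initial, middle, final = note_dur[i], note_dur[i + 1], note_dur[i + 2]
--         duration = initial + middle + final
--         note_cnt += 3  # 3개 단위로 note_cnt 증가
--
--         # 다음 음절이 현재 음절과 같다면 end만 갱신
--         if i + 3 != len(note_dur) and note[i + 2] == note[i + 3]:
--             end += duration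
--         else:
--             # note_cnt가 3을 넘으면 단일 음소가 아님
--             single_phoneme_flags = (note_cnt == 3)
--             end += duration
--
--             # 현재 음절에 대한 시작, 종료, 플래그 값, 요소 개수 추가
--             note_boundaries.append((start, end, single_phoneme_flags, note_cnt))
--
--             # 초기화
--             start = end
--             note_cnt = 0
--
--     return note_boundaries
-- ===== SOURCE B (Python) =====
-- def create_note_boundaries(note, note_dur):
--     n = len(note_dur)
--     durs = [note_dur[i] + note_dur[i + 1] + note_dur[i + 2] for i in range(0, n, 3)]
--     prefix = [0]
--     total = 0
--     for d in durs:
--         total += d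
--         prefix.append(total)
--     breaks = [k for k in range(len(durs)) if 3 * k + 3 == n or note[3 * k + 2] != note[3 * k + 3]]
--     out = []
--     a = 0
--     for b in breaks:
--         out.append((prefix[a], prefix[b + 1], b == a, 3 * (b - a + 1)))
--         a = b + 1
--     return out
-- ===== Notes on version B (the rewrite author's own statement) =====
-- stated objective: alternative
-- what changed: A's single fused loop that accumulates start/end/count while emitting is replaced by three phases: per-group durations with running prefix sums, a list of run-ending breakpoint indices, and an emission pass pairing consecutive breakpoints via the prefix sums.
import Mathlib
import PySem

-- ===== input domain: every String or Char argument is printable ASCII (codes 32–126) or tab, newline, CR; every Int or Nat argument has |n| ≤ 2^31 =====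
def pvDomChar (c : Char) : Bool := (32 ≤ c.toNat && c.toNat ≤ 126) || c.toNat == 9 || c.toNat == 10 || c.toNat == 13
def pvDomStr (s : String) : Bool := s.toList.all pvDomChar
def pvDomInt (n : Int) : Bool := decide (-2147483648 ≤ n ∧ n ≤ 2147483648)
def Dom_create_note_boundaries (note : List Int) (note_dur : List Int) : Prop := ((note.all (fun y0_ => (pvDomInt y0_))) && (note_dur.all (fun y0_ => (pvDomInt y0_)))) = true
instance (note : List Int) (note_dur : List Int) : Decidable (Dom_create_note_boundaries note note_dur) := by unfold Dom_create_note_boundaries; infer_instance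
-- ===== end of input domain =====

-- B rebuilds the boundaries in three phases (group durations with prefix sums, then the
-- run-ending breakpoint indices, then pairing consecutive breakpoints) instead of A's single
-- fused accumulating loop; the return values are proved equal wherever the Python A returns.

-- ===== PORT A =====
-- A-side helper: the body of A's fused loop; state = (note_boundaries, start, end, note_cnt).
-- xs[i] is ported as pyGetD (default 0): exact wherever Python does not raise; the
-- IndexError inputs are excluded by Pre_create_note_boundaries.
def pvStepA (note note_dur : List Int) (n : Int)
    (st : List (Int × Int × Bool × Int) × Int × Int × Int) (i : Int) :
    List (Int × Int × Bool × Int) × Int × Int × Int :=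
  let duration := PySem.List.pyGetD note_dur i 0 + PySem.List.pyGetD note_dur (i + 1) 0 +
      PySem.List.pyGetD note_dur (i + 2) 0
  let cnt := st.2.2.2 + 3
  if i + 3 ≠ n ∧ PySem.List.pyGetD note (i + 2) 0 = PySem.List.pyGetD note (i + 3) 0 then
    (st.1, st.2.1, st.2.2.1 + duration, cnt)
  else
    (st.1 ++ [(st.2.1, st.2.2.1 + duration, cnt == 3, cnt)], st.2.2.1 + duration, st.2.2.1 + duration, 0)

def create_note_boundaries (note : List Int) (note_dur : List Int) : List (Int × Int × Bool × Int) :=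
  ((PySem.List.pyRange 0 (note_dur.length : Int) 3).foldl
    (pvStepA note note_dur (note_dur.length : Int)) ([], 0, 0, 0)).1

-- ===== PORT B =====
-- B-side helpers: comprehension body for group durations, prefix-sum step, breakpoint
-- predicate, and the emission step pairing consecutive breakpoints.
def pvDurB (note_dur : List Int) (i : Int) : Int :=
  PySem.List.pyGetD note_dur i 0 + PySem.List.pyGetD note_dur (i + 1) 0 +
    PySem.List.pyGetD note_dur (i + 2) 0

def pvStepPre (st : List Int × Int) (d : Int) : List Int × Int :=
  (st.1 ++ [st.2 + d], st.2 + d)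

def pvBrkB (note : List Int) (n : Int) (k : Int) : Bool :=
  (3 * k + 3 == n) || !(PySem.List.pyGetD note (3 * k + 2) 0 == PySem.List.pyGetD note (3 * k + 3) 0)

def pvStepB (pref : List Int) (st : List (Int × Int × Bool × Int) × Int) (b : Int) :
    List (Int × Int × Bool × Int) × Int :=
  (st.1 ++ [(PySem.List.pyGetD pref st.2 0, PySem.List.pyGetD pref (b + 1) 0,
             b == st.2, 3 * (b - st.2 + 1))], b + 1)

def create_note_boundaries_alt (note : List Int) (note_dur : List Int) : List (Int × Int × Bool × Int) :=
  let n : Int := (note_dur.length : Int)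
  let durs := (PySem.List.pyRange 0 n 3).map (pvDurB note_dur)
  let pref := (durs.foldl pvStepPre ([0], 0)).1
  let breaks := (PySem.List.pyRange 0 (PySem.List.len durs) 1).filter (pvBrkB note n)
  (breaks.foldl (pvStepB pref) ([], 0)).1

-- ===== PRECONDITION & SPEC =====
-- Pre_ excludes exactly the inputs on which the Python A raises IndexError:
-- len(note_dur) not a multiple of 3 (note_dur[i+1]/[i+2]), or note too short for the
-- note[i+2]/note[i+3] comparison (largest index reached is len(note_dur) - 3).
def Pre_create_note_boundaries (note : List Int) (note_dur : List Int) : Prop :=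
  note_dur.length % 3 = 0 ∧ (note_dur.length < 6 ∨ note_dur.length - 2 ≤ note.length)
instance (note : List Int) (note_dur : List Int) : Decidable (Pre_create_note_boundaries note note_dur) := by
  unfold Pre_create_note_boundaries; infer_instance

def pvWitness_create_note_boundaries : List Int × List Int := ([5, 5, 1, 2], [1, 2, 3, 4, 5, 6])

def Spec_create_note_boundaries (note : List Int) (note_dur : List Int) (out : List (Int × Int × Bool × Int)) : Prop := out = create_note_boundaries_alt note note_dur
instance (note : List Int) (note_dur : List Int) (out : List (Int × Int × Bool × Int)) : Decidable (Spec_create_note_boundaries note note_dur out) := by unfold Spec_create_note_boundaries; infer_instance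

-- ===== CLAIM (what is proved, stated in full; the proofs are below) =====
def Claim_equal_create_note_boundaries : Prop := ∀ (note : List Int) (note_dur : List Int), Dom_create_note_boundaries note note_dur → Pre_create_note_boundaries note note_dur → Spec_create_note_boundaries note note_dur (create_note_boundaries note note_dur)

-- ===== LEMMAS AND PROOFS =====

-- Proof-side reference data: per-group duration, prefix sums, breakpoint test, and a
-- reference recursion both ports are shown to compute.
def pvDur (nd : List Int) (k : Nat) : Int :=
  nd.getD (3 * k) 0 + nd.getD (3 * k + 1) 0 + nd.getD (3 * k + 2) 0

def pvPre (nd : List Int) (k : Nat) : Int := ((List.range k).map (pvDur nd)).sum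

def pvBrk (note nd : List Int) (k : Nat) : Bool :=
  (3 * (k : Int) + 3 == (nd.length : Int)) || !(note.getD (3 * k + 2) 0 == note.getD (3 * k + 3) 0)

def pvRef (note nd : List Int) : Nat → Nat → Int → Int → Int → List (Int × Int × Bool × Int)
  | 0, _, _, _, _ => []
  | m + 1, k, s, e, c =>
    if pvBrk note nd k then
      (s, e + pvDur nd k, c + 3 == 3, c + 3) :: pvRef note nd m (k + 1) (e + pvDur nd k) (e + pvDur nd k) 0
    else
      pvRef note nd m (k + 1) s (e + pvDur nd k) (c + 3)

lemma pvPre_succ (nd : List Int) (k : Nat) : pvPre nd (k + 1) = pvPre nd k + pvDur nd k := by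
  simp [pvPre, List.range_succ]

lemma pvRef_succ (note nd : List Int) (m k : Nat) (s e c : Int) :
    pvRef note nd (m + 1) k s e c =
      if pvBrk note nd k then
        (s, e + pvDur nd k, c + 3 == 3, c + 3) ::
          pvRef note nd m (k + 1) (e + pvDur nd k) (e + pvDur nd k) 0
      else pvRef note nd m (k + 1) s (e + pvDur nd k) (c + 3) := rfl

lemma pvStepA_eq (note nd : List Int) (st : List (Int × Int × Bool × Int) × Int × Int × Int) (k : Nat) :
    pvStepA note nd (nd.length : Int) st ((3 * k : Nat) : Int) =
      if pvBrk note nd k then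
        (st.1 ++ [(st.2.1, st.2.2.1 + pvDur nd k, st.2.2.2 + 3 == 3, st.2.2.2 + 3)],
          st.2.2.1 + pvDur nd k, st.2.2.1 + pvDur nd k, 0)
      else (st.1, st.2.1, st.2.2.1 + pvDur nd k, st.2.2.2 + 3) := by
  have h1 : ((3 * k : Nat) : Int) + 1 = ((3 * k + 1 : Nat) : Int) := by push_cast; ring
  have h2 : ((3 * k : Nat) : Int) + 2 = ((3 * k + 2 : Nat) : Int) := by push_cast; ring
  have h3 : ((3 * k : Nat) : Int) + 3 = ((3 * k + 3 : Nat) : Int) := by push_cast; ring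
  unfold pvStepA pvDur pvBrk
  rw [h1, h2, h3]
  simp only [PySem.List.pyGetD_natCast]
  by_cases hb : ((3 * (k : Int) + 3 == (nd.length : Int)) || !(note.getD (3 * k + 2) 0 == note.getD (3 * k + 3) 0)) = true
  · rw [if_pos hb, if_neg]
    rintro ⟨hne, heq⟩
    simp only [Bool.or_eq_true, beq_iff_eq, Bool.not_eq_eq_eq_not, Bool.not_true,
      beq_eq_false_iff_ne, ne_eq] at hb
    rcases hb with h | h
    · apply hne; push_cast; omega
    · exact h heq
  · rw [if_neg hb, if_pos]
    simp only [Bool.or_eq_true, beq_iff_eq, Bool.not_eq_eq_eq_not, Bool.not_true,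
      beq_eq_false_iff_ne, ne_eq, not_or, not_not] at hb
    refine ⟨?_, hb.2⟩
    intro h
    apply hb.1
    push_cast at h
    omega

lemma pvFoldA (note nd : List Int) : ∀ (m k : Nat) (bs : List (Int × Int × Bool × Int)) (s e c : Int),
    (((List.range' k m).map (fun j => ((3 * j : Nat) : Int))).foldl
      (pvStepA note nd (nd.length : Int)) (bs, s, e, c)).1 = bs ++ pvRef note nd m k s e c := by
  intro m
  induction m with
  | zero => intro k bs s e c; simp [pvRef]
  | succ m ih =>
    intro k bs s e c
    rw [List.range'_succ, List.map_cons, List.foldl_cons, pvStepA_eq, pvRef_succ]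
    by_cases hb : pvBrk note nd k
    · rw [if_pos hb, if_pos hb, ih, List.append_assoc, List.singleton_append]
    · rw [if_neg hb, if_neg hb, ih]

lemma pvDurB_cast (nd : List Int) (k : Nat) : pvDurB nd ((3 * k : Nat) : Int) = pvDur nd k := by
  have h1 : ((3 * k : Nat) : Int) + 1 = ((3 * k + 1 : Nat) : Int) := by push_cast; ring
  have h2 : ((3 * k : Nat) : Int) + 2 = ((3 * k + 2 : Nat) : Int) := by push_cast; ring
  unfold pvDurB pvDur
  rw [h1, h2]
  simp only [PySem.List.pyGetD_natCast]

lemma pvBrkB_cast (note nd : List Int) (k : Nat) :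
    pvBrkB note (nd.length : Int) ((k : Nat) : Int) = pvBrk note nd k := by
  have h2 : 3 * ((k : Nat) : Int) + 2 = ((3 * k + 2 : Nat) : Int) := by push_cast; ring
  have h3 : 3 * ((k : Nat) : Int) + 3 = ((3 * k + 3 : Nat) : Int) := by push_cast; ring
  unfold pvBrkB pvBrk
  rw [h2, h3]
  simp only [PySem.List.pyGetD_natCast]

lemma pvFoldPre (nd : List Int) : ∀ (m k : Nat) (p : List Int),
    ((List.range' k m).map (pvDur nd)).foldl pvStepPre (p, pvPre nd k) =
      (p ++ (List.range' (k + 1) m).map (pvPre nd), pvPre nd (k + m)) := by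
  intro m
  induction m with
  | zero => intro k p; simp
  | succ m ih =>
    intro k p
    rw [List.range'_succ, List.map_cons, List.foldl_cons]
    have hs : pvStepPre (p, pvPre nd k) (pvDur nd k) = (p ++ [pvPre nd (k + 1)], pvPre nd (k + 1)) := by
      simp [pvStepPre, pvPre_succ]
    rw [hs, ih (k + 1) (p ++ [pvPre nd (k + 1)])]
    rw [List.range'_succ, List.map_cons]
    have : k + 1 + m = k + (m + 1) := by omega
    rw [this]
    simp

lemma pvPrefGet (nd : List Int) (G j : Nat) (hj : j < G + 1) :
    PySem.List.pyGetD ((List.range (G + 1)).map (pvPre nd)) ((j : Nat) : Int) 0 = pvPre nd j := by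
  rw [PySem.List.pyGetD_natCast, PySem.List.getD_map_range _ _ _ _ hj]

lemma pvFlagEq (k a : Nat) : (((k : Nat) : Int) == ((a : Nat) : Int)) = (3 * (((k : Nat) : Int) - ((a : Nat) : Int)) + 3 == 3) := by
  by_cases h : ((k : Nat) : Int) = ((a : Nat) : Int)
  · simp [h]
  · have h2 : ¬(3 * (((k : Nat) : Int) - ((a : Nat) : Int)) + 3 = 3) := by omega
    simp [h, h2]

lemma pvFoldB (note nd : List Int) (G : Nat) :
    ∀ (m k : Nat), k + m ≤ G → ∀ (a : Nat), a ≤ k → ∀ (out : List (Int × Int × Bool × Int)),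
    ((((List.range' k m).filter (pvBrk note nd)).map (fun j => ((j : Nat) : Int))).foldl
        (pvStepB ((List.range (G + 1)).map (pvPre nd))) (out, ((a : Nat) : Int))).1 =
      out ++ pvRef note nd m k (pvPre nd a) (pvPre nd k) (3 * (((k : Nat) : Int) - ((a : Nat) : Int))) := by
  intro m
  induction m with
  | zero => intro k hk a ha out; simp [pvRef]
  | succ m ih =>
    intro k hk a ha out
    rw [List.range'_succ]
    by_cases hb : pvBrk note nd k
    · rw [List.filter_cons_of_pos hb, List.map_cons, List.foldl_cons]
      have hstep : pvStepB ((List.range (G + 1)).map (pvPre nd)) (out, ((a : Nat) : Int)) ((k : Nat) : Int) =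
          (out ++ [(pvPre nd a, pvPre nd (k + 1), 3 * (((k : Nat) : Int) - ((a : Nat) : Int)) + 3 == 3,
            3 * (((k : Nat) : Int) - ((a : Nat) : Int)) + 3)], (((k + 1 : Nat)) : Int)) := by
        unfold pvStepB
        have h1 : ((k : Nat) : Int) + 1 = (((k + 1 : Nat)) : Int) := by push_cast; ring
        rw [h1, pvPrefGet nd G a (by omega), pvPrefGet nd G (k + 1) (by omega), pvFlagEq]
        have h2 : 3 * (((k : Nat) : Int) - ((a : Nat) : Int) + 1) = 3 * (((k : Nat) : Int) - ((a : Nat) : Int)) + 3 := by ring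
        rw [h2]
      rw [hstep, ih (k + 1) (by omega) (k + 1) (by omega)]
      simp only [pvRef, hb, if_true]
      have h0 : (((k + 1 : Nat)) : Int) - (((k + 1 : Nat)) : Int) = 0 := by ring
      rw [h0, pvPre_succ]
      simp [mul_zero]
    · rw [List.filter_cons_of_neg hb]
      rw [ih (k + 1) (by omega) a (by omega)]
      simp only [pvRef, hb, if_false, Bool.false_eq_true]
      rw [pvPre_succ]
      have : 3 * ((((k + 1 : Nat)) : Int) - ((a : Nat) : Int)) = 3 * (((k : Nat) : Int) - ((a : Nat) : Int)) + 3 := by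
        push_cast; ring
      rw [this]

lemma pvRange3 (N : Nat) :
    PySem.List.pyRange 0 (N : Int) 3 = (List.range ((N + 2) / 3)).map (fun k => ((3 * k : Nat) : Int)) := by
  rw [PySem.List.pyRange_of_pos _ _ (by norm_num)]
  by_cases hN : N = 0
  · subst hN; simp
  · rw [if_pos (by exact_mod_cast Nat.pos_of_ne_zero hN)]
    have harg : (((N : Int) - 0 + 3 - 1) / 3).toNat = (N + 2) / 3 := by
      have h : (N : Int) - 0 + 3 - 1 = ((N + 2 : Nat) : Int) := by push_cast; ring
      rw [h]
      rw [show ((3 : Int)) = ((3 : Nat) : Int) from rfl, ← Int.natCast_div]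
      exact Int.toNat_natCast _
    rw [harg]
    exact List.map_congr_left (fun k _ => by push_cast; ring)

lemma pvPortsAgree (note nd : List Int) :
    create_note_boundaries note nd = create_note_boundaries_alt note nd := by
  unfold create_note_boundaries create_note_boundaries_alt
  dsimp only
  rw [pvRange3 nd.length]
  set G := (nd.length + 2) / 3 with hG
  -- A side
  rw [List.range_eq_range', pvFoldA note nd G 0 [] 0 0 0]
  -- B side: durations list
  have hdurs : ((List.range' 0 G).map fun k => ((3 * k : Nat) : Int)).map (pvDurB nd) =
      (List.range' 0 G).map (pvDur nd) := by
    rw [List.map_map]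
    exact List.map_congr_left (fun k _ => pvDurB_cast nd k)
  rw [hdurs]
  -- prefix list
  have hpre0 : pvPre nd 0 = 0 := by simp [pvPre]
  have hpref : (((List.range' 0 G).map (pvDur nd)).foldl pvStepPre ([0], 0)).1 =
      (List.range (G + 1)).map (pvPre nd) := by
    have := pvFoldPre nd G 0 [0]
    rw [hpre0] at this
    rw [this]
    rw [List.range_eq_range', List.range'_succ, List.map_cons, hpre0]
    simp
  rw [hpref]
  -- breaks list
  have hlen : PySem.List.len ((List.range' 0 G).map (pvDur nd)) = (G : Int) := by
    simp [PySem.List.len_eq]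
  rw [hlen, PySem.List.pyRange_zero_natCast, List.filter_map]
  have hfilt : (List.range G).filter (pvBrkB note (nd.length : Int) ∘ fun k => ((k : Nat) : Int)) =
      (List.range G).filter (pvBrk note nd) := by
    exact List.filter_congr (fun k _ => pvBrkB_cast note nd k)
  rw [hfilt]
  have hB := pvFoldB note nd G G 0 (by omega) 0 (by omega) []
  simp only [hpre0, Nat.cast_zero, sub_zero, mul_zero, List.nil_append, List.range_eq_range'] at hB ⊢
  exact hB.symm

-- ===== VERDICT (by name: the statement is the Claim_ definition above) =====
theorem create_note_boundaries_spec : Claim_equal_create_note_boundaries := by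
  intro note note_dur _ _
  unfold Spec_create_note_boundaries
  exact pvPortsAgree note note_dur
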